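-- pv_equiv track=rewrite | github.com/Shirli19/CalendarPdi | calendar_site/Parcial2019/funciones.py | eliminar_contiguos
-- ===== SOURCE A (Python) =====
-- def eliminar_contiguos(lista, delFL=False):
--     lista2 = []
--     # hasta el penultimo elemento
--     for i, valor in enumerate(lista[:-1]):
--         if lista[i] + 1 != lista[i + 1]:
--             lista2.append(lista[i])
--             lista2.append(lista[i + 1])
--
--     if not delFL:
--         lista2.insert(0, lista[0])
--         lista2.append(lista[-1])
--     return sorted(list(set(lista2)))
-- ===== SOURCE B (Python) =====
-- def eliminar_contiguos(lista, delFL=False):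
--     # Run-based decomposition: group lista into maximal runs of positionally
--     # consecutive integers, then emit each run's first/last; the global first
--     # and last endpoints are emitted only when delFL is false.
--     runs = []  # (first, last) of each maximal consecutive run
--     for v in lista:
--         if runs and runs[-1][1] + 1 == v:
--             runs[-1] = (runs[-1][0], v)
--         else:
--             runs.append((v, v))
--     out = set()
--     R = len(runs)
--     for r, (first, last) in enumerate(runs):
--         if r > 0 or not delFL:
--             out.add(first)
--         if r < R - 1 or not delFL:
--             out.add(last)
--     return sorted(out)
-- ===== Notes on version B (the rewrite author's own statement) =====
-- stated objective: alternative
-- what changed: B groups the list into maximal runs of positionally consecutive integers (a run-length pass maintaining (first,last) per run) and then emits each run's endpoints -- all of them when delFL is false, skipping the global first and last when delFL is true -- instead of A's pair-wise scan that appends both ends of every broken adjacent pair and dedups.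
-- crash fix: On the empty list with delFL=False A raises IndexError (lista[0]); B returns []. — e.g. on eliminar_contiguos([], false): A raises IndexError, B returns []
import Mathlib
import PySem

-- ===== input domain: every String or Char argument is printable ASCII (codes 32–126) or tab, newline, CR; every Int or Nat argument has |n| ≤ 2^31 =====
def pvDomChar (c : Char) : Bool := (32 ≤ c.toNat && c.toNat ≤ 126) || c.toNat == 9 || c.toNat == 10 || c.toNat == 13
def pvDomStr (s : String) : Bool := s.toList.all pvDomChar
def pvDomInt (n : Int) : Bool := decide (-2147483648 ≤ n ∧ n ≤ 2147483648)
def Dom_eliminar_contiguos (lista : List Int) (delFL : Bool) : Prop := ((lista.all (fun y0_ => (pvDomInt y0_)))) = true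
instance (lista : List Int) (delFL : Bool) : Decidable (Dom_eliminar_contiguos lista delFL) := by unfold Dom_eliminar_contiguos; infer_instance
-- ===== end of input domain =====

-- B replaces A's pair-wise broken-pair scan by a run-length decomposition: group the list
-- into maximal runs of positionally consecutive integers, then emit run endpoints
-- (skipping the global first/last when delFL); objective: alternative algorithm.

-- shared indexing helper: lista[i] (in range under Pre_)
def pvAt (lista : List Int) (i : Int) : Int := PySem.List.pyGetD lista i 0

-- ===== PORT A =====
def eliminar_contiguos (lista : List Int) (delFL : Bool) : List Int :=
  let lista2 : List Int :=
    (PySem.List.enumerate (PySem.List.slice lista none (some (-1)))).foldl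
      (fun acc p =>
        if pvAt lista p.1 + 1 ≠ pvAt lista (p.1 + 1) then
          acc ++ [pvAt lista p.1, pvAt lista (p.1 + 1)]
        else acc) []
  let lista2 : List Int :=
    if !delFL then pvAt lista 0 :: lista2 ++ [pvAt lista (-1)] else lista2
  PySem.List.sorted (PySem.Set.ofList lista2) (fun x => x) false

-- ===== PORT B =====
-- runs loop: `if runs and runs[-1][1] + 1 == v: runs[-1] = (runs[-1][0], v) else: runs.append((v, v))`
def pvRunStep (rs : List (Int × Int)) (v : Int) : List (Int × Int) :=
  match rs.getLast? with
  | some (f, l) => if l + 1 = v then rs.dropLast ++ [(f, v)] else rs ++ [(v, v)]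
  | none => [(v, v)]

def eliminar_contiguos_alt (lista : List Int) (delFL : Bool) : List Int :=
  let runs : List (Int × Int) := lista.foldl pvRunStep []
  let R : Int := runs.length
  let out : PySem.Set Int :=
    (PySem.List.enumerate runs).foldl
      (fun s p =>
        let s := if 0 < p.1 ∨ delFL = false then PySem.Set.add s p.2.1 else s
        if p.1 < R - 1 ∨ delFL = false then PySem.Set.add s p.2.2 else s)
      PySem.Set.empty
  PySem.List.sorted out (fun x => x) false

-- ===== PRECONDITION & SPEC =====
-- Pre_ excludes only the empty list with delFL = false, where A raises IndexError.
def Pre_eliminar_contiguos (lista : List Int) (delFL : Bool) : Prop :=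
  delFL = true ∨ lista ≠ []
instance (lista : List Int) (delFL : Bool) : Decidable (Pre_eliminar_contiguos lista delFL) := by
  unfold Pre_eliminar_contiguos; infer_instance
def pvWitness_eliminar_contiguos : List Int × Bool := ([1, 2, 4], false)

-- On the empty list with delFL=False A raises IndexError (lista[0]); B returns [].
def Raises_eliminar_contiguos (lista : List Int) (delFL : Bool) : Prop :=
  lista = [] ∧ delFL = false
instance (lista : List Int) (delFL : Bool) : Decidable (Raises_eliminar_contiguos lista delFL) := by
  unfold Raises_eliminar_contiguos; infer_instance
def pvRaiseWitness_eliminar_contiguos : List Int × Bool := ([], false)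
def pvRaiseWitnessOut_eliminar_contiguos : List Int := []

def Spec_eliminar_contiguos (lista : List Int) (delFL : Bool) (out : List Int) : Prop :=
  out = eliminar_contiguos_alt lista delFL
instance (lista : List Int) (delFL : Bool) (out : List Int) : Decidable (Spec_eliminar_contiguos lista delFL out) := by
  unfold Spec_eliminar_contiguos; infer_instance

-- ===== CLAIM (what is proved, stated in full; the proofs are below) =====
def Claim_equal_eliminar_contiguos : Prop := ∀ (lista : List Int) (delFL : Bool), Dom_eliminar_contiguos lista delFL → Pre_eliminar_contiguos lista delFL → Spec_eliminar_contiguos lista delFL (eliminar_contiguos lista delFL)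
def Claim_raises_eliminar_contiguos : Prop := (∀ (lista : List Int) (delFL : Bool), Dom_eliminar_contiguos lista delFL → Raises_eliminar_contiguos lista delFL → ¬ Pre_eliminar_contiguos lista delFL) ∧ (Dom_eliminar_contiguos (pvRaiseWitness_eliminar_contiguos.1) (pvRaiseWitness_eliminar_contiguos.2) ∧ Raises_eliminar_contiguos (pvRaiseWitness_eliminar_contiguos.1) (pvRaiseWitness_eliminar_contiguos.2) ∧ eliminar_contiguos_alt (pvRaiseWitness_eliminar_contiguos.1) (pvRaiseWitness_eliminar_contiguos.2) = pvRaiseWitnessOut_eliminar_contiguos)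

-- ===== LEMMAS AND PROOFS =====

-- x sits at a broken adjacent pair of the list (either end of it)
def pvBrk : List Int → Int → Prop
  | [], _ => False
  | [_], _ => False
  | a :: b :: t, x => (a + 1 ≠ b ∧ (x = a ∨ x = b)) ∨ pvBrk (b :: t) x

-- recursive description of the runs produced by B's first loop from state (s, p)
def pvRunsFrom (s p : Int) : List Int → List (Int × Int)
  | [] => [(s, p)]
  | v :: rest => if p + 1 = v then pvRunsFrom s v rest else (s, p) :: pvRunsFrom v v rest

-- ---- A-side membership ----

theorem memA (c : Int × Int → Prop) [DecidablePred c] (f g : Int × Int → Int)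
    (l : List (Int × Int)) (init : List Int) (x : Int) :
    x ∈ l.foldl (fun acc p => if c p then acc ++ [f p, g p] else acc) init ↔
      x ∈ init ∨ ∃ p ∈ l, c p ∧ (x = f p ∨ x = g p) := by
  induction l generalizing init with
  | nil => simp
  | cons hd tl ih =>
    simp only [List.foldl_cons, ih, List.mem_cons]
    split_ifs with h
    · simp only [List.mem_append, List.mem_cons, List.not_mem_nil]
      constructor
      · rintro ((hx | rfl | rfl | h0) | ⟨p, hp, hc, hfg⟩) <;> aesop
      · rintro (hx | ⟨p, (rfl | hp), hc, (rfl | rfl)⟩) <;> aesop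
    · constructor
      · rintro (hx | ⟨p, hp, hc, hfg⟩) <;> aesop
      · rintro (hx | ⟨p, (rfl | hp), hc, hfg⟩) <;> aesop

theorem pvAt_nat (lista : List Int) (k : Nat) : pvAt lista (k : Int) = lista.getD k 0 := by
  simp [pvAt]

theorem pvAt_nat_add_one (lista : List Int) (k : Nat) :
    pvAt lista ((k : Int) + 1) = lista.getD (k + 1) 0 := by
  have h : ((k : Int) + 1) = ((k + 1 : Nat) : Int) := by push_cast; ring
  rw [h, pvAt_nat]

-- A's pair-wise existential, in terms of natural indices
theorem coreA (lista : List Int) (x : Int) :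
    (∃ p ∈ PySem.List.enumerate (PySem.List.slice lista none (some (-1))) 0,
       (pvAt lista p.1 + 1 ≠ pvAt lista (p.1 + 1)) ∧
       (x = pvAt lista p.1 ∨ x = pvAt lista (p.1 + 1))) ↔
    ∃ k : Nat, k + 1 < lista.length ∧ lista.getD k 0 + 1 ≠ lista.getD (k + 1) 0 ∧
       (x = lista.getD k 0 ∨ x = lista.getD (k + 1) 0) := by
  rw [PySem.List.slice_to_neg_one]
  constructor
  · rintro ⟨p, hp, hcond, hx⟩
    rw [PySem.List.mem_enumerate_iff] at hp
    obtain ⟨k, hk, rfl⟩ := hp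
    have hl := lista.length_dropLast
    simp only [zero_add, pvAt_nat, pvAt_nat_add_one] at hcond hx
    exact ⟨k, by omega, hcond, hx⟩
  · rintro ⟨k, hk, hcond, hx⟩
    have hl := lista.length_dropLast
    refine ⟨((k : Int), lista.dropLast.getD k 0), ?_, ?_, ?_⟩
    · rw [PySem.List.mem_enumerate_iff]
      refine ⟨k, by omega, ?_⟩
      simp [List.getD_eq_getElem?_getD, List.getElem?_eq_getElem (by omega : k < lista.dropLast.length)]
    · simpa only [pvAt_nat, pvAt_nat_add_one] using hcond
    · simpa only [pvAt_nat, pvAt_nat_add_one] using hx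

-- the index existential is exactly pvBrk
theorem brk_iff_idx (lista : List Int) (x : Int) :
    pvBrk lista x ↔
      ∃ k : Nat, k + 1 < lista.length ∧ lista.getD k 0 + 1 ≠ lista.getD (k + 1) 0 ∧
        (x = lista.getD k 0 ∨ x = lista.getD (k + 1) 0) := by
  induction lista with
  | nil => simp [pvBrk]
  | cons a rest ih =>
    cases rest with
    | nil =>
      simp only [pvBrk, List.length_cons, List.length_nil]
      constructor
      · intro h; exact h.elim
      · rintro ⟨k, hk, _⟩; omega
    | cons b t =>
      simp only [pvBrk, ih]
      constructor
      · rintro (⟨hne, hx⟩ | ⟨k, hk, hne, hx⟩)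
        · refine ⟨0, ?_, by simpa using hne, by simpa using hx⟩
          simp
        · refine ⟨k + 1, ?_, by simpa using hne, by simpa using hx⟩
          simp at hk ⊢; omega
      · rintro ⟨k, hk, hne, hx⟩
        cases k with
        | zero => exact Or.inl ⟨by simpa using hne, by simpa using hx⟩
        | succ k' =>
          refine Or.inr ⟨k', ?_, ?_, ?_⟩
          · simp at hk ⊢; omega
          · simpa using hne
          · simpa using hx


-- ---- B-side membership ----

theorem memB2 (c1 c2 : Int × (Int × Int) → Prop) [DecidablePred c1] [DecidablePred c2]
    (l : List (Int × (Int × Int))) (s0 : PySem.Set Int) (x : Int) :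
    x ∈ l.foldl
        (fun s p =>
          let s := if c1 p then PySem.Set.add s p.2.1 else s
          if c2 p then PySem.Set.add s p.2.2 else s) s0 ↔
      x ∈ s0 ∨ ∃ p ∈ l, (c1 p ∧ x = p.2.1) ∨ (c2 p ∧ x = p.2.2) := by
  induction l generalizing s0 with
  | nil => simp
  | cons hd tl ih =>
    simp only [List.foldl_cons, ih, List.mem_cons]
    split_ifs with h1 h2 h2 <;>
      (try simp only [PySem.Set.mem_add]) <;> constructor <;> (intro h) <;> aesop

theorem nodupB2 (c1 c2 : Int × (Int × Int) → Prop) [DecidablePred c1] [DecidablePred c2]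
    (l : List (Int × (Int × Int))) (s0 : PySem.Set Int) (hs : s0.Nodup) :
    (l.foldl
        (fun s p =>
          let s := if c1 p then PySem.Set.add s p.2.1 else s
          if c2 p then PySem.Set.add s p.2.2 else s) s0).Nodup := by
  induction l generalizing s0 with
  | nil => exact hs
  | cons hd tl ih =>
    simp only [List.foldl_cons]
    apply ih
    split_ifs <;> first
      | exact PySem.Set.nodup_add _ _ (PySem.Set.nodup_add _ _ hs)
      | exact PySem.Set.nodup_add _ _ hs
      | exact hs

-- runsFrom is nonempty and starts with first component s
theorem runsFrom_head (l : List Int) : ∀ (s p : Int),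
    ∃ e t, pvRunsFrom s p l = (s, e) :: t := by
  induction l with
  | nil => intro s p; exact ⟨p, [], rfl⟩
  | cons v rest ih =>
    intro s p
    unfold pvRunsFrom
    split_ifs with h
    · exact ih s v
    · exact ⟨p, pvRunsFrom v v rest, rfl⟩


-- last component of the last run is the last element of (p :: l)
theorem runsFrom_last (l : List Int) : ∀ (s p : Int),
    ∃ f, (pvRunsFrom s p l).getLastD (0, 0) = (f, l.getLastD p) := by
  induction l with
  | nil => intro s p; exact ⟨s, rfl⟩
  | cons v rest ih =>
    intro s p
    unfold pvRunsFrom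
    split_ifs with h
    · rw [List.getLastD_cons]; exact ih s v
    · obtain ⟨e, t, he⟩ := runsFrom_head rest v v
      obtain ⟨f, hf⟩ := ih v v
      refine ⟨f, ?_⟩
      rw [List.getLastD_cons, List.getLastD_cons, he, List.getLastD_cons]
      rw [he, List.getLastD_cons] at hf
      exact hf


-- B's first loop computes pvRunsFrom
theorem foldl_runStep (l : List Int) : ∀ (acc : List (Int × Int)) (s p : Int),
    l.foldl pvRunStep (acc ++ [(s, p)]) = acc ++ pvRunsFrom s p l := by
  induction l with
  | nil => intro acc s p; simp [pvRunsFrom]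
  | cons v rest ih =>
    intro acc s p
    simp only [List.foldl_cons]
    have hstep : pvRunStep (acc ++ [(s, p)]) v =
        if p + 1 = v then acc ++ [(s, v)] else (acc ++ [(s, p)]) ++ [(v, v)] := by
      unfold pvRunStep
      rw [List.getLast?_concat]
      split_ifs with h <;> simp_all
    rw [hstep]
    unfold pvRunsFrom
    split_ifs with h
    · exact ih acc s v
    · rw [ih (acc ++ [(s, p)]) v v]; simp


-- pvBrk through the runs: x borders a break iff x is a non-first run's first
-- or a non-last run's last
theorem brk_iff_runs (l : List Int) : ∀ (s p x : Int),
    pvBrk (p :: l) x ↔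
      x ∈ (pvRunsFrom s p l).tail.map Prod.fst ∨
      x ∈ (pvRunsFrom s p l).dropLast.map Prod.snd := by
  induction l with
  | nil => intro s p x; simp [pvBrk, pvRunsFrom]
  | cons v rest ih =>
    intro s p x
    unfold pvRunsFrom
    split_ifs with h
    · have : pvBrk (p :: v :: rest) x ↔ pvBrk (v :: rest) x := by
        simp [pvBrk, h]
      rw [this]
      exact ih s v x
    · obtain ⟨e, t, he⟩ := runsFrom_head rest v v
      have hbrk : pvBrk (p :: v :: rest) x ↔ ((x = p ∨ x = v) ∨ pvBrk (v :: rest) x) := by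
        simp [pvBrk, h]
      rw [hbrk, ih v v x, he]
      simp only [List.map_cons, List.mem_cons,
        List.dropLast_cons_of_ne_nil (by simp : (v, e) :: t ≠ []), List.tail]
      simp [he] at *
      tauto


-- index form ↔ membership form, inner (delFL = true) case
theorem innerIdx_mem (rs : List (Int × Int)) (x : Int) :
    (∃ k : Nat, k < rs.length ∧
       ((0 < k ∧ x = (rs.getD k (0, 0)).1) ∨ (k + 1 < rs.length ∧ x = (rs.getD k (0, 0)).2))) ↔
      x ∈ rs.tail.map Prod.fst ∨ x ∈ rs.dropLast.map Prod.snd := by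
  constructor
  · rintro ⟨k, hk, (⟨h0, hx⟩ | ⟨h1, hx⟩)⟩
    · left
      rw [List.getD_eq_getElem rs _ hk] at hx
      have hk' : k - 1 < rs.tail.length := by simp [List.length_tail]; omega
      refine List.mem_map.mpr ⟨rs.tail[k - 1], List.getElem_mem _, ?_⟩
      subst hx
      have ek : k - 1 + 1 = k := by omega
      simp [List.getElem_tail, ek]
    · right
      rw [List.getD_eq_getElem rs _ hk] at hx
      have hk' : k < rs.dropLast.length := by simp; omega
      refine List.mem_map.mpr ⟨rs.dropLast[k], List.getElem_mem _, ?_⟩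
      rw [List.getElem_dropLast]
      subst hx
      rfl
  · rintro (hm | hm)
    · obtain ⟨y, hy, rfl⟩ := List.mem_map.mp hm
      obtain ⟨j, hj, rfl⟩ := List.mem_iff_getElem.mp hy
      have hj' : j + 1 < rs.length := by simp [List.length_tail] at hj; omega
      refine ⟨j + 1, hj', Or.inl ⟨by omega, ?_⟩⟩
      rw [List.getD_eq_getElem rs _ hj', List.getElem_tail]
    · obtain ⟨y, hy, rfl⟩ := List.mem_map.mp hm
      obtain ⟨j, hj, rfl⟩ := List.mem_iff_getElem.mp hy
      have hj' : j + 1 < rs.length := by simp at hj; omega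
      refine ⟨j, by omega, Or.inr ⟨hj', ?_⟩⟩
      rw [List.getD_eq_getElem rs _ (by omega), List.getElem_dropLast]


-- index form ↔ membership form, full (delFL = false) case
theorem allIdx_mem (rs : List (Int × Int)) (x : Int) :
    (∃ k : Nat, k < rs.length ∧
       (x = (rs.getD k (0, 0)).1 ∨ x = (rs.getD k (0, 0)).2)) ↔
      x ∈ rs.map Prod.fst ∨ x ∈ rs.map Prod.snd := by
  constructor
  · rintro ⟨k, hk, (hx | hx)⟩ <;> rw [List.getD_eq_getElem rs _ hk] at hx
    · exact Or.inl (List.mem_map.mpr ⟨rs[k], List.getElem_mem _, hx.symm⟩)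
    · exact Or.inr (List.mem_map.mpr ⟨rs[k], List.getElem_mem _, hx.symm⟩)
  · rintro (hm | hm) <;> obtain ⟨y, hy, rfl⟩ := List.mem_map.mp hm <;>
      obtain ⟨j, hj, rfl⟩ := List.mem_iff_getElem.mp hy
    · exact ⟨j, hj, Or.inl (by rw [List.getD_eq_getElem rs _ hj])⟩
    · exact ⟨j, hj, Or.inr (by rw [List.getD_eq_getElem rs _ hj])⟩



-- enumerate form of B's emission, in natural indices
theorem memB_idx (runs : List (Int × Int)) (d : Bool) (x : Int) :
    (∃ p ∈ PySem.List.enumerate runs 0,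
       ((0 < p.1 ∨ d = false) ∧ x = p.2.1) ∨
       ((p.1 < (runs.length : Int) - 1 ∨ d = false) ∧ x = p.2.2)) ↔
      ∃ k : Nat, k < runs.length ∧
        (((0 < k ∨ d = false) ∧ x = (runs.getD k (0, 0)).1) ∨
         ((k + 1 < runs.length ∨ d = false) ∧ x = (runs.getD k (0, 0)).2)) := by
  constructor
  · rintro ⟨p, hp, hcase⟩
    rw [PySem.List.mem_enumerate_iff] at hp
    obtain ⟨k, hk, rfl⟩ := hp
    refine ⟨k, hk, ?_⟩
    rw [List.getD_eq_getElem runs _ hk]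
    simp only [zero_add] at hcase
    rcases hcase with ⟨hc, hx⟩ | ⟨hc, hx⟩
    · exact Or.inl ⟨by rcases hc with hc | hc; exacts [Or.inl (by exact_mod_cast hc), Or.inr hc], hx⟩
    · exact Or.inr ⟨by rcases hc with hc | hc; exacts [Or.inl (by omega), Or.inr hc], hx⟩
  · rintro ⟨k, hk, hcase⟩
    refine ⟨((k : Int), runs[k]), ?_, ?_⟩
    · rw [PySem.List.mem_enumerate_iff]; exact ⟨k, hk, by simp⟩
    rw [List.getD_eq_getElem runs _ hk] at hcase
    simp only []
    rcases hcase with ⟨hc, hx⟩ | ⟨hc, hx⟩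
    · refine Or.inl ⟨?_, hx⟩
      rcases hc with hc | hc
      · exact Or.inl (by exact_mod_cast hc)
      · exact Or.inr hc
    · refine Or.inr ⟨?_, hx⟩
      rcases hc with hc | hc
      · exact Or.inl (by omega)
      · exact Or.inr hc

-- A's collected pairs are exactly the break-bordering elements
theorem memA_brk (lista : List Int) (x : Int) :
    (x ∈ (PySem.List.enumerate (PySem.List.slice lista none (some (-1)))).foldl
      (fun acc p =>
        if pvAt lista p.1 + 1 ≠ pvAt lista (p.1 + 1) then
          acc ++ [pvAt lista p.1, pvAt lista (p.1 + 1)]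
        else acc) []) ↔ pvBrk lista x := by
  rw [memA (fun p => pvAt lista p.1 + 1 ≠ pvAt lista (p.1 + 1))
      (fun p => pvAt lista p.1) (fun p => pvAt lista (p.1 + 1))]
  simp only [List.not_mem_nil, false_or]
  rw [coreA, ← brk_iff_idx]

-- ===== VERDICT =====
theorem eliminar_contiguos_spec : Claim_equal_eliminar_contiguos := by
  intro lista delFL _ hpre
  unfold Spec_eliminar_contiguos
  cases lista with
  | nil =>
    cases delFL with
    | true => rfl
    | false =>
      exfalso
      rcases hpre with h | h
      · exact Bool.false_ne_true h
      · exact h rfl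
  | cons a l0 =>
    simp only [eliminar_contiguos, eliminar_contiguos_alt]
    have hruns : (a :: l0).foldl pvRunStep [] = pvRunsFrom a a l0 := by
      have := foldl_runStep l0 [] a a
      simpa [pvRunStep] using this
    rw [hruns]
    obtain ⟨e, t, he⟩ := runsFrom_head l0 a a
    obtain ⟨f, hf⟩ := runsFrom_last l0 a a
    refine PySem.List.sorted_eq_sorted_of_perm _ _ _ (fun u v h => h) ?_
    refine (List.perm_ext_iff_of_nodup (PySem.Set.nodup_ofList _)
      (nodupB2 _ _ _ _ (by simp [PySem.Set.empty]))).mpr ?_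
    intro x
    rw [PySem.Set.mem_ofList,
      memB2 (fun p => 0 < p.1 ∨ delFL = false)
        (fun p => p.1 < ((pvRunsFrom a a l0).length : Int) - 1 ∨ delFL = false)]
    simp only [PySem.Set.empty, List.not_mem_nil, false_or]
    rw [memB_idx]
    cases delFL with
    | true =>
      simp only [Bool.not_true, Bool.false_eq_true, if_false]
      rw [memA_brk]
      simp only [(by decide : (true = false) = False), or_false]
      rw [innerIdx_mem, ← brk_iff_runs l0 a a x]
    | false =>
      simp only [Bool.not_false, if_true]
      have hx0 : pvAt (a :: l0) 0 = a := by simp [pvAt]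
      have hxl : pvAt (a :: l0) (-1) = l0.getLastD a := by
        rw [pvAt, PySem.List.pyGetD_neg_one _ _ (by simp)]
        simp [List.getLast_eq_getLastD]
      simp only [List.mem_cons, List.mem_append, List.not_mem_nil, or_false, hx0, hxl]
      rw [memA_brk, brk_iff_runs l0 a a x]
      simp only [or_true, true_and]
      rw [allIdx_mem]
      have hsplit : (pvRunsFrom a a l0).map Prod.fst =
          a :: (pvRunsFrom a a l0).tail.map Prod.fst := by
        rw [he]; simp
      have hne : pvRunsFrom a a l0 ≠ [] := by rw [he]; simp
      have hsnd : (pvRunsFrom a a l0).map Prod.snd =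
          (pvRunsFrom a a l0).dropLast.map Prod.snd ++ [l0.getLastD a] := by
        conv_lhs => rw [← List.dropLast_append_getLast hne]
        rw [List.map_append]
        have h1 : (pvRunsFrom a a l0).getLast? = some ((pvRunsFrom a a l0).getLast hne) :=
          List.getLast?_eq_some_getLast hne
        rw [List.getLastD_eq_getLast?, h1] at hf
        simp at hf
        simp [hf]
      rw [hsplit, hsnd]
      simp only [List.mem_cons, List.mem_append, List.not_mem_nil, or_false]
      tauto

@[simp] theorem eliminar_contiguos_raises : Claim_raises_eliminar_contiguos := by
  unfold Claim_raises_eliminar_contiguos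
  constructor
  · rintro lista delFL _ ⟨rfl, rfl⟩ (h | h) <;> simp_all
  · exact ⟨by decide, by decide, by decide⟩
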